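-- pv_equiv track=rewrite | github.com/lcomment/codynators-backend | app/algorithm.py | save_xlsx_value
-- ===== SOURCE A (Python) =====
-- def save_xlsx_value(x, y):
--     values = []
--     for i in range(1, 9):
--         if i == int(x) or i == int(y):
--             values.append(1)
--         else:
--             values.append(0)
--     return values
-- ===== SOURCE B (Python) =====
-- def save_xlsx_value(x, y):
--     values = [0] * 8
--     for idx in (int(x), int(y)):
--         if 1 <= idx <= 8:
--             values[idx - 1] = 1
--     return values
-- ===== Notes on version B (the rewrite author's own statement) =====
-- stated objective: simpler
-- what changed: B scatters directly: it allocates [0]*8 once and sets positions x-1 and y-1 (when in 1..8) to 1, instead of A's scan over all eight positions testing each against x and y.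
import Mathlib
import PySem

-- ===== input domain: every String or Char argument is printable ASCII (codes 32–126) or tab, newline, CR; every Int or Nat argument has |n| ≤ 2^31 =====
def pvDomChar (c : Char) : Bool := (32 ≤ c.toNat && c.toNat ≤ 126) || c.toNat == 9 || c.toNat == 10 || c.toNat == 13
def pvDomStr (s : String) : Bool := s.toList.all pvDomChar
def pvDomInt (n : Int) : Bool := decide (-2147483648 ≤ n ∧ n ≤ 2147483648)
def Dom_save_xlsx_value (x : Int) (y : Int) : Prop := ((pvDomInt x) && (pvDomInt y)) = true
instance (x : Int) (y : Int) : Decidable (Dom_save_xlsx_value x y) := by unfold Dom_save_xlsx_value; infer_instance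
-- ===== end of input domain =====

-- B builds the vector by two guarded index writes into [0]*8 instead of scanning all eight cells testing membership; same return value.

-- ===== PORT A =====
def save_xlsx_value (x : Int) (y : Int) : List Int :=
  (PySem.List.pyRange 1 9 1).foldl
    (fun values i => values ++ [if i == x || i == y then (1 : Int) else 0]) []

-- ===== PORT B =====
-- values[idx - 1] = 1, guarded by 1 <= idx <= 8 (so the index is always in range)
def pvScatter (values : List Int) (idx : Int) : List Int :=
  if 1 ≤ idx ∧ idx ≤ 8 then values.set (idx - 1).toNat 1 else values

def save_xlsx_value_alt (x : Int) (y : Int) : List Int :=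
  [x, y].foldl pvScatter (List.replicate 8 0)

-- ===== PRECONDITION & SPEC =====
def Spec_save_xlsx_value (x : Int) (y : Int) (out : List Int) : Prop := out = save_xlsx_value_alt x y
instance (x : Int) (y : Int) (out : List Int) : Decidable (Spec_save_xlsx_value x y out) := by unfold Spec_save_xlsx_value; infer_instance

-- ===== CLAIM (what is proved, stated in full; the proofs are below) =====
def Claim_equal_save_xlsx_value : Prop := ∀ (x : Int) (y : Int), Dom_save_xlsx_value x y → Spec_save_xlsx_value x y (save_xlsx_value x y)

-- ===== LEMMAS AND PROOFS =====

-- Common characterisation: cell k holds 1 iff k+1 equals x or y.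
def pvInd (x y : Int) : List Int :=
  (List.range 8).map (fun (k : Nat) => if ((k : Int) + 1 = x ∨ (k : Int) + 1 = y) then (1 : Int) else 0)

theorem a_eq_ind (x y : Int) : save_xlsx_value x y = pvInd x y := by
  unfold save_xlsx_value pvInd
  have hr : PySem.List.pyRange 1 9 1 = [1,2,3,4,5,6,7,8] := by decide
  have hr8 : List.range 8 = [0,1,2,3,4,5,6,7] := by decide
  rw [hr, hr8]
  simp only [List.foldl, beq_iff_eq, Bool.or_eq_true,
    List.nil_append, List.cons_append]
  norm_num

theorem len_scatter (l : List Int) (i : Int) : (pvScatter l i).length = l.length := by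
  unfold pvScatter; split_ifs <;> simp

theorem b_eq_ind (x y : Int) : save_xlsx_value_alt x y = pvInd x y := by
  unfold save_xlsx_value_alt
  simp only [List.foldl]
  apply List.ext_getElem
  · simp [len_scatter, pvInd]
  · intro i h1 h2
    have h8 : i < 8 := by simpa [len_scatter] using h1
    simp only [pvInd]
    rw [List.getElem_map]
    rw [List.getElem_range]
    unfold pvScatter
    split_ifs with hy hx hx <;>
      (try simp only [List.getElem_set, List.getElem_replicate]) <;>
      (try split_ifs) <;> omega

-- ===== VERDICT (by name: the statement is the Claim_ definition above) =====
theorem save_xlsx_value_spec : Claim_equal_save_xlsx_value := by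
  intro x y _
  unfold Spec_save_xlsx_value
  rw [a_eq_ind, b_eq_ind]
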